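-- pv_equiv track=rewrite | github.com/shahaansshah/Audiolab | noteid.py | num_to_name
-- ===== SOURCE A (Python) =====
-- validRange = range(21, 129)
--
-- names = [
--     ['B', 11],
--     ['A', 9],
--     ['G', 7],
--     ['F', 5],
--     ['E', 4],
--     ['D', 2],
--     ['C', 0],
--     ['#', 1],
--     ['b', -1]
-- ]
--
-- def num_to_name(num: int):  # Black notes are always named with sharps
--     num = check_valid_num(num)-12
--     octv = num // 12
--     num -= octv * 12
--     name, accid = None, None
--     for pair in names:
--         if pair[1] <= num:
--             name = pair[0]
--             num -= pair[1]
--             break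
--     if num == 1:
--         accid = '#'
--         num -= 1
--     name = name + (accid or '') + str(octv)
--     return name
--
-- def check_valid_num(num: int):
--     if type(num) != int:
--         raise TypeError('Must pass an integer into this function.')
--     if num not in validRange:
--         raise ValueError('Note number out of validRange. Must be from ' +
--                          str(min(validRange)) + ' to ' +
--                          str(max(validRange)) + '.')
--     return num
-- ===== SOURCE B (Python) =====
-- validRange = range(21, 129)
--
-- NOTE_TABLE = ['C', 'C#', 'D', 'D#', 'E', 'F', 'F#', 'G', 'G#', 'A', 'A#', 'B']
--
-- def check_valid_num(num: int):
--     if type(num) != int: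
--         raise TypeError('Must pass an integer into this function.')
--     if num not in validRange:
--         raise ValueError('Note number out of validRange. Must be from ' +
--                          str(min(validRange)) + ' to ' +
--                          str(max(validRange)) + '.')
--     return num
--
-- def num_to_name(num: int):
--     n = check_valid_num(num) - 12
--     return NOTE_TABLE[n % 12] + str(n // 12)
-- ===== Notes on version B (the rewrite author's own statement) =====
-- stated objective: simpler
-- what changed: Replaces A's descending-threshold search over the names list plus the separate sharp-patching branch with a single indexed lookup in a precomputed chromatic table at the pitch-class remainder.
import Mathlib
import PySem

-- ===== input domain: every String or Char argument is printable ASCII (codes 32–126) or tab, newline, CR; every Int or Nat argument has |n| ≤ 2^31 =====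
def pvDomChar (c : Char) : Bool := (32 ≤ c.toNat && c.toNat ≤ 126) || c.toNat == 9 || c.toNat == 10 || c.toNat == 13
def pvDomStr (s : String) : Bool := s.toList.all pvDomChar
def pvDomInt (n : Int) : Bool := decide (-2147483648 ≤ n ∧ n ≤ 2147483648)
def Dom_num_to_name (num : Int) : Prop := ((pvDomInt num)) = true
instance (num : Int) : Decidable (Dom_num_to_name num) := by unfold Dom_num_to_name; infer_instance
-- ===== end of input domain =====

-- B replaces A's descending-threshold scan of the names list and its '#'-patching
-- branch with one indexed lookup in a precomputed 12-entry chromatic table (simpler).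


-- ===== PORT A =====
-- the `names` list of ['letter', offset] pairs
def pvNamesA : List (String × Int) :=
  [("B", 11), ("A", 9), ("G", 7), ("F", 5), ("E", 4), ("D", 2), ("C", 0), ("#", 1), ("b", -1)]

-- A's for-loop with break: first pair whose offset ≤ num gives (name, num - offset)
def pvFindName : List (String × Int) → Int → Option String × Int
  | [], num => (none, num)
  | p :: rest, num => if p.2 ≤ num then (some p.1, num - p.2) else pvFindName rest num

def num_to_name (num : Int) : String :=
  let n := num - 12                                -- check_valid_num(num) - 12 (Pre_ excludes the raising inputs)
  let octv := PySem.Int.floordiv n 12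
  let n := n - octv * 12
  let r := pvFindName pvNamesA n
  let name := r.1
  let n := r.2
  let accid : String := if n == 1 then "#" else ""  -- accid or ''
  -- name is never none inside Pre_ (the ("C", 0) entry matches); outside Python would raise TypeError
  name.getD "" ++ accid ++ PySem.Int.toStr octv

-- ===== PORT B =====
def pvNoteTable : List String :=
  ["C", "C#", "D", "D#", "E", "F", "F#", "G", "G#", "A", "A#", "B"]

def num_to_name_alt (num : Int) : String :=
  let n := num - 12                                -- check_valid_num(num) - 12 (Pre_ excludes the raising inputs)
  -- NOTE_TABLE[n % 12]: index is always in 0..11, so pyGet? is some; getD "" is unreachable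
  (PySem.List.pyGet? pvNoteTable (PySem.Int.mod n 12)).getD "" ++ PySem.Int.toStr (PySem.Int.floordiv n 12)

-- ===== PRECONDITION & SPEC =====
-- Pre_ excludes exactly the inputs on which check_valid_num raises ValueError (num outside range(21, 129))
def Pre_num_to_name (num : Int) : Prop := 21 ≤ num ∧ num ≤ 128
instance (num : Int) : Decidable (Pre_num_to_name num) := by unfold Pre_num_to_name; infer_instance
def pvWitness_num_to_name : Int := (60)

def Spec_num_to_name (num : Int) (out : String) : Prop := out = num_to_name_alt num
instance (num : Int) (out : String) : Decidable (Spec_num_to_name num out) := by unfold Spec_num_to_name; infer_instance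

-- ===== CLAIM (what is proved, stated in full; the proofs are below) =====
def Claim_equal_num_to_name : Prop := ∀ (num : Int), Dom_num_to_name num → Pre_num_to_name num → Spec_num_to_name num (num_to_name num)

-- ===== LEMMAS AND PROOFS =====

-- ===== VERDICT (by name: the statement is the Claim_ definition above) =====
theorem num_to_name_spec : Claim_equal_num_to_name := by
  intro num _ hpre
  obtain ⟨h1, h2⟩ := hpre
  unfold Spec_num_to_name
  interval_cases num <;> decide
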